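-- pv_equiv track=rewrite | github.com/lbryio/lbry-sdk | lbry/blockchain/sync/filter_builder.py | split_range_into_10k_batches
-- ===== SOURCE A (Python) =====
-- def split_range_into_10k_batches(start, end):
--     batch = [start, end]
--     batches = [batch]
--     for block in range(start, end+1):
--         if 0 < block != batch[0] and block % 10_000 == 0:
--             batch = [block, block]
--             batches.append(batch)
--         else:
--             batch[1] = block
--     return batches
-- ===== SOURCE B (Python) =====
-- def split_range_into_10k_batches(start, end):
--     if end < start:
--         return [[start, end]]
--     batches = []
--     lo = start
--     m = (max(start, 0) // 10_000 + 1) * 10_000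
--     while m <= end:
--         batches.append([lo, m - 1])
--         lo = m
--         m += 10_000
--     batches.append([lo, end])
--     return batches
-- ===== Notes on version B (the rewrite author's own statement) =====
-- stated objective: faster
-- what changed: B computes the 10k-aligned batch boundaries directly by integer arithmetic (one loop step per boundary) instead of A's walk over every single block in [start, end].
import Mathlib
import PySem

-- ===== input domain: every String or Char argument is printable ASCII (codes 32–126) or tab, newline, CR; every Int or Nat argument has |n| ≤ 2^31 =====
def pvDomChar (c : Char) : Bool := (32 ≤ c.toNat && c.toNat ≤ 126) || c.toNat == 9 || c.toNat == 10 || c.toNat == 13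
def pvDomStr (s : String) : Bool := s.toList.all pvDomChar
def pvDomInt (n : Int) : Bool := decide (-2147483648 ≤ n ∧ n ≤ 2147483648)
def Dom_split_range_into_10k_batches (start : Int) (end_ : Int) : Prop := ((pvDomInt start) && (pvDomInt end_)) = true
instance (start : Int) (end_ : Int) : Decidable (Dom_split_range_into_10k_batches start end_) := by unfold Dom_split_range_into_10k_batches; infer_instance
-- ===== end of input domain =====

-- B replaces A's walk over every block in [start, end] by direct arithmetic on the 10k-aligned
-- boundaries, producing one batch per boundary: O((end-start)/10000) instead of O(end-start).

-- ===== PORT A =====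
-- The Python mutates `batch` (a list aliased inside `batches`) in place; the port keeps the
-- current batch as a pair alongside the list of finished batches and renders pairs to lists at
-- the end — the same values in the same order.
-- `for block in range(start, end+1)` becomes the recursion on `block`; `block % 10_000`
-- is PySem.Int.mod (exact: Python `%`).
def aLoop (done : List (Int × Int)) (cur : Int × Int) (block : Int) (end_ : Int) :
    List (Int × Int) :=
  if h : block ≤ end_ then
    if 0 < block ∧ block ≠ cur.1 ∧ PySem.Int.mod block 10000 = 0 then
      aLoop (done ++ [cur]) (block, block) (block + 1) end_
    else
      aLoop done (cur.1, block) (block + 1) end_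
  else
    done ++ [cur]
termination_by (end_ + 1 - block).toNat
decreasing_by all_goals omega

def split_range_into_10k_batches (start : Int) (end_ : Int) : List (List Int) :=
  (aLoop [] (start, end_) start end_).map (fun p => [p.1, p.2])

-- ===== PORT B =====
-- the while loop of Source B: append [lo, m-1] while the boundary m fits, then the final batch
def bLoop (batches : List (List Int)) (lo : Int) (m : Int) (end_ : Int) : List (List Int) :=
  if h : m ≤ end_ then
    bLoop (batches ++ [[lo, m - 1]]) m (m + 10000) end_
  else
    batches ++ [[lo, end_]]
termination_by (end_ + 1 - m).toNat
decreasing_by omega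

def split_range_into_10k_batches_alt (start : Int) (end_ : Int) : List (List Int) :=
  if end_ < start then [[start, end_]]
  else bLoop [] start ((PySem.Int.floordiv (max start 0) 10000 + 1) * 10000) end_

-- ===== PRECONDITION & SPEC =====
def Spec_split_range_into_10k_batches (start : Int) (end_ : Int) (out : List (List Int)) : Prop := out = split_range_into_10k_batches_alt start end_
instance (start : Int) (end_ : Int) (out : List (List Int)) : Decidable (Spec_split_range_into_10k_batches start end_ out) := by unfold Spec_split_range_into_10k_batches; infer_instance

-- ===== CLAIM (what is proved, stated in full; the proofs are below) =====
def Claim_equal_split_range_into_10k_batches : Prop := ∀ (start : Int) (end_ : Int), Dom_split_range_into_10k_batches start end_ → Spec_split_range_into_10k_batches start end_ (split_range_into_10k_batches start end_)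

-- ===== LEMMAS AND PROOFS =====

-- the next positive multiple of 10000 strictly above lo
def nextB (lo : Int) : Int := ((max lo 0) / 10000 + 1) * 10000

theorem nextB_gt (lo : Int) : lo < nextB lo := by
  unfold nextB
  have h := Int.ediv_add_emod (max lo 0) 10000
  have h1 : 0 ≤ (max lo 0) % 10000 := Int.emod_nonneg _ (by norm_num)
  have h2 : (max lo 0) % 10000 < 10000 := Int.emod_lt_of_pos _ (by norm_num)
  have h3 : lo ≤ max lo 0 := le_max_left _ _
  omega

theorem nextB_pos (lo : Int) : 0 < nextB lo := by
  unfold nextB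
  have h4 : (0:Int) ≤ max lo 0 := le_max_right _ _
  have h5 : 0 ≤ (max lo 0) / 10000 := Int.ediv_nonneg h4 (by norm_num)
  nlinarith

theorem nextB_mod (lo : Int) : nextB lo % 10000 = 0 := by
  unfold nextB
  exact Int.mul_emod_left _ _

theorem nextB_least (lo x : Int) (hx0 : 0 < x) (hxl : lo < x) (hxm : x % 10000 = 0)
    : nextB lo ≤ x := by
  unfold nextB
  have h := Int.ediv_add_emod (max lo 0) 10000
  have h1 : 0 ≤ (max lo 0) % 10000 := Int.emod_nonneg _ (by norm_num)
  have hx := Int.ediv_add_emod x 10000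
  omega

theorem nextB_step (m : Int) (hm : 0 < m) (hmod : m % 10000 = 0) : nextB m = m + 10000 := by
  unfold nextB
  have hmax : max m 0 = m := max_eq_left hm.le
  rw [hmax]
  have h := Int.ediv_add_emod m 10000
  have : m / 10000 * 10000 = m := by omega
  nlinarith [this]

theorem pymod_eq (x : Int) : PySem.Int.mod x 10000 = x % 10000 :=
  PySem.Int.mod_eq_emod_of_pos (by norm_num)

-- Main loop invariant: A's loop from state (done, (lo, d)) at position `block` produces the
-- same batches as B's arithmetic loop from boundary nextB lo, provided d is end_ at the end,
-- and no boundary lies strictly between lo and block.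
theorem aLoop_eq_bLoop (end_ : Int) :
    ∀ (n : Nat) (done : List (Int × Int)) (lo d block : Int),
      n = (end_ + 1 - block).toNat →
      block ≤ end_ + 1 →
      lo ≤ block →
      (block = lo ∧ d = end_ ∨ lo < block ∧ d = block - 1) →
      (∀ x, lo < x → x < block → ¬(0 < x ∧ x % 10000 = 0)) →
      (aLoop done (lo, d) block end_).map (fun p => [p.1, p.2]) =
        bLoop (done.map (fun p => [p.1, p.2])) lo (nextB lo) end_ := by
  intro n
  induction n using Nat.strong_induction_on with
  | _ n ih =>
    intro done lo d block hn hble hlo hinv hfree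
    by_cases hb : block ≤ end_
    · rw [aLoop]
      simp only [hb, dite_true]
      by_cases hsplit : 0 < block ∧ block ≠ (lo, d).1 ∧ PySem.Int.mod block 10000 = 0
      · -- split: block is exactly nextB lo
        rw [if_pos hsplit]
        obtain ⟨hbp, hbne, hbm⟩ := hsplit
        rw [pymod_eq] at hbm
        have hlt : lo < block := lt_of_le_of_ne hlo (fun h => hbne h.symm)
        have hge : nextB lo ≤ block := nextB_least lo block hbp hlt hbm
        have hle : block ≤ nextB lo := by
          by_contra hc
          push_neg at hc
          exact hfree (nextB lo) (nextB_gt lo) hc ⟨nextB_pos lo, nextB_mod lo⟩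
        have hbeq : nextB lo = block := le_antisymm hge hle
        have hd : d = block - 1 := by
          rcases hinv with ⟨h1, _⟩ | ⟨_, h2⟩
          · omega
          · exact h2
        rw [bLoop]
        simp only [hbeq, hb, dite_true]
        have := ih (end_ + 1 - (block + 1)).toNat (by omega)
          (done ++ [(lo, d)]) block block (block + 1) rfl (by omega) (by omega)
          (Or.inr ⟨by omega, by omega⟩)
          (by intro x h1 h2; omega)
        rw [this]
        rw [nextB_step block hbp hbm, hd]
        simp
      · -- no split at block
        rw [if_neg hsplit]
        have hxnot : ∀ x, lo < x → x < block + 1 → ¬(0 < x ∧ x % 10000 = 0) := by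
          intro x h1 h2 ⟨hx0, hxm⟩
          by_cases hxb : x = block
          · subst hxb
            exact hsplit ⟨hx0, by simpa using (by omega : x ≠ lo), by rw [pymod_eq]; exact hxm⟩
          · exact hfree x h1 (by omega) ⟨hx0, hxm⟩
        exact ih (end_ + 1 - (block + 1)).toNat (by omega) done lo block (block + 1) rfl
          (by omega) (by omega) (Or.inr ⟨by omega, by omega⟩) hxnot
    · -- block = end_ + 1 (or start > end_): both loops terminate
      have hd : d = end_ := by rcases hinv with ⟨h1, h2⟩ | ⟨h1, h2⟩ <;> omega
      rw [aLoop]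
      simp only [hb, dite_false]
      rw [bLoop]
      have hng : ¬ nextB lo ≤ end_ := by
        intro hc
        exact hfree (nextB lo) (nextB_gt lo) (by omega) ⟨nextB_pos lo, nextB_mod lo⟩
      simp only [hng, dite_false]
      rw [hd]
      simp

theorem floordiv_max_eq (start : Int) :
    (PySem.Int.floordiv (max start 0) 10000 + 1) * 10000 = nextB start := by
  unfold nextB
  rw [PySem.Int.floordiv_eq_ediv_of_pos (by norm_num)]

-- ===== VERDICT (by name: the statement is the Claim_ definition above) =====
theorem split_range_into_10k_batches_spec : Claim_equal_split_range_into_10k_batches := by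
  intro start end_ _
  unfold Spec_split_range_into_10k_batches split_range_into_10k_batches
    split_range_into_10k_batches_alt
  rw [floordiv_max_eq]
  by_cases h : end_ < start
  · rw [aLoop, dif_neg (by omega : ¬ start ≤ end_), if_pos h]
    simp
  · rw [if_neg h]
    have := aLoop_eq_bLoop end_ (end_ + 1 - start).toNat [] start end_ start rfl
      (by omega) le_rfl (Or.inl ⟨rfl, rfl⟩) (by intro x h1 h2; omega)
    simpa using this
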